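-- pv_equiv track=rewrite | github.com/TheEnigmaticT/podruff-site | social-engine/social_quotecard.py | _tokenize_with_highlight
-- ===== SOURCE A (Python) =====
-- from typing import Literal, Optional
--
-- def _tokenize_with_highlight(text: str, highlight: Optional[str]):
--     """Split text into (token, is_highlighted) pairs.
--
--     `highlight` is a substring to emphasise in the accent color. Case-insensitive
--     match on first occurrence. Pure-punctuation tokens get merged into the
--     previous token (keeps the previous token's highlight state) so you don't
--     get dangling " ." or " ," after a highlighted phrase."""
--     if not highlight:
--         tokens = [(w, False) for w in text.split()]
--     else:
--         lo = text.lower().find(highlight.lower())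
--         if lo < 0:
--             tokens = [(w, False) for w in text.split()]
--         else:
--             tokens = []
--             for w in text[:lo].split():
--                 tokens.append((w, False))
--             for w in text[lo:lo+len(highlight)].split():
--                 tokens.append((w, True))
--             for w in text[lo+len(highlight):].split():
--                 tokens.append((w, False))
--     # Merge pure-punctuation tokens into the previous token (keep prev highlight).
--     merged = []
--     _punct = set(".,!?;:\u2014\u2013\"'")  # incl em/en dash
--     for w, hl in tokens:
--         if merged and all(c in _punct for c in w):
--             pw, phl = merged[-1]
--             merged[-1] = (pw + w, phl)
--         else:
--             merged.append((w, hl))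
--     return merged
-- ===== SOURCE B (Python) =====
-- # Single left-to-right character scan: tokens are maximal non-space runs with a
-- # constant highlight flag (flag = lo <= i < lo+len(highlight)); punctuation-only
-- # tokens are merged into the previous output token at emit time.
-- _PUNCT = set(".,!?;:\u2014\u2013\"'")
--
--
-- def _emit(out, w, hl):
--     if out and all(c in _PUNCT for c in w):
--         pw, phl = out[-1]
--         out = out[:-1] + [(pw + w, phl)]
--     else:
--         out = out + [(w, hl)]
--     return out
--
--
-- def _tokenize_with_highlight(text, highlight):
--     if highlight:
--         lo = text.lower().find(highlight.lower())
--         hi = lo + len(highlight) if lo >= 0 else lo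
--     else:
--         lo = hi = -1
--     out = []
--     buf = ''
--     buf_hl = False
--     for i, c in enumerate(text):
--         if c.isspace():
--             if buf:
--                 out = _emit(out, buf, buf_hl)
--                 buf = ''
--         else:
--             hl = lo <= i < hi
--             if buf and hl != buf_hl:
--                 out = _emit(out, buf, buf_hl)
--                 buf = ''
--             buf += c
--             buf_hl = hl
--     if buf:
--         out = _emit(out, buf, buf_hl)
--     return out
-- ===== Notes on version B (the rewrite author's own statement) =====
-- stated objective: alternative
-- what changed: Replaces the three-slice split (text[:lo], text[lo:hi], text[hi:] each .split() and re-concatenated) followed by a separate punctuation-merge pass with a single left-to-right character scan keeping a token buffer and its highlight flag, flushing on whitespace or a flag change and merging punctuation-only tokens into the previous token at emit time.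
import Mathlib
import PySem

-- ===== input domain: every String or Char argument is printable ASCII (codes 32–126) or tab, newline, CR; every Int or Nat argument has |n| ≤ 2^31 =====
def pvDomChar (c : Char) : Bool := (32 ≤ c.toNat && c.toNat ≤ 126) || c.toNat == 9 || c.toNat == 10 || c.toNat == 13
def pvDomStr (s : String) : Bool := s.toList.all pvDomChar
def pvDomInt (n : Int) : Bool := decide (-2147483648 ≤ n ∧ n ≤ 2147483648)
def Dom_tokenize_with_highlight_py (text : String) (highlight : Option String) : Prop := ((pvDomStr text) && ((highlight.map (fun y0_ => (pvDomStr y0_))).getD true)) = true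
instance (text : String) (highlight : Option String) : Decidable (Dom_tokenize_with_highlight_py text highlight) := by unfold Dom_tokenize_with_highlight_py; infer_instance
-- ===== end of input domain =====

-- B replaces A's three-slice split (text[:lo], text[lo:hi], text[hi:] each .split(), concatenated)
-- plus a separate punctuation-merge pass by ONE left-to-right character scan with a token buffer,
-- its highlight flag, and emit-time merging; same return value (alternative decomposition, no speed claim).

-- ===== PORT A =====
-- the module constant _punct (a Python set literal of distinct chars)
def pvPunct : PySem.Set Char := PySem.Set.ofList ".,!?;:—–\"'".toList

-- all(c in _punct for c in w)
def pvIsPunctTok (w : List Char) : Bool := w.all (fun c => pvPunct.contains c)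

-- the merge-pass body: 'if merged and all(...): merged[-1] = (pw + w, phl) else: merged.append((w, hl))'
def pvMergeStep (merged : List (List Char × Bool)) (t : List Char × Bool) : List (List Char × Bool) :=
  match merged.getLast?, pvIsPunctTok t.1 with
  | some (pw, phl), true => merged.dropLast ++ [(pw ++ t.1, phl)]
  | _, _ => merged ++ [t]

def tokenize_with_highlight_py (text : String) (highlight : Option String) : List (String × Bool) :=
  let cs := text.toList
  let tokens : List (List Char × Bool) :=
    match highlight with
    | none => (PySem.Chars.split₀ cs).map (fun w => (w, false))
    | some h =>
      if h.toList = [] then (PySem.Chars.split₀ cs).map (fun w => (w, false))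
      else
        let lo : Int := PySem.Chars.find (PySem.Chars.lower cs) (PySem.Chars.lower h.toList)
        if lo < 0 then (PySem.Chars.split₀ cs).map (fun w => (w, false))
        else
          (PySem.Chars.split₀ (PySem.List.slice cs none (some lo))).map (fun w => (w, false))
          ++ (PySem.Chars.split₀ (PySem.List.slice cs (some lo) (some (lo + (h.toList.length : Int))))).map (fun w => (w, true))
          ++ (PySem.Chars.split₀ (PySem.List.slice cs (some (lo + (h.toList.length : Int))) none)).map (fun w => (w, false))
  (tokens.foldl pvMergeStep []).map (fun t => (String.ofList t.1, t.2))

-- ===== PORT B =====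
-- the loop body of Source B: state (out, buf, buf_hl), one enumerated character (i, c)
def pvStepB (lo hi : Int) (st : List (List Char × Bool) × List Char × Bool) (ic : Int × Char) :
    List (List Char × Bool) × List Char × Bool :=
  if PySem.Chars.isspace ic.2 then
    (if st.2.1 ≠ [] then (pvMergeStep st.1 (st.2.1, st.2.2), ([] : List Char), st.2.2) else st)
  else
    let hl : Bool := decide (lo ≤ ic.1 ∧ ic.1 < hi)
    if st.2.1 ≠ [] ∧ hl ≠ st.2.2 then (pvMergeStep st.1 (st.2.1, st.2.2), [ic.2], hl)
    else (st.1, st.2.1 ++ [ic.2], hl)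

def tokenize_with_highlight_py_alt (text : String) (highlight : Option String) : List (String × Bool) :=
  let cs := text.toList
  let lohi : Int × Int :=
    match highlight with
    | none => (-1, -1)
    | some h =>
      if h.toList = [] then (-1, -1)
      else
        let lo : Int := PySem.Chars.find (PySem.Chars.lower cs) (PySem.Chars.lower h.toList)
        (lo, if 0 ≤ lo then lo + (h.toList.length : Int) else lo)
  let st := (PySem.List.enumerate cs 0).foldl (pvStepB lohi.1 lohi.2) ([], [], false)
  let out := if st.2.1 ≠ [] then pvMergeStep st.1 (st.2.1, st.2.2) else st.1
  out.map (fun t => (String.ofList t.1, t.2))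

-- ===== PRECONDITION & SPEC =====
def Spec_tokenize_with_highlight_py (text : String) (highlight : Option String) (out : List (String × Bool)) : Prop := out = tokenize_with_highlight_py_alt text highlight
instance (text : String) (highlight : Option String) (out : List (String × Bool)) : Decidable (Spec_tokenize_with_highlight_py text highlight out) := by unfold Spec_tokenize_with_highlight_py; infer_instance

-- ===== CLAIM (what is proved, stated in full; the proofs are below) =====
def Claim_equal_tokenize_with_highlight_py : Prop := ∀ (text : String) (highlight : Option String), Dom_tokenize_with_highlight_py text highlight → Spec_tokenize_with_highlight_py text highlight (tokenize_with_highlight_py text highlight)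

-- ===== LEMMAS AND PROOFS =====

-- plain (merge-free) scan step over an annotated character (c, flag)
def pvStepP (st : List (List Char × Bool) × List Char × Bool) (a : Char × Bool) :
    List (List Char × Bool) × List Char × Bool :=
  if PySem.Chars.isspace a.1 then
    (if st.2.1 ≠ [] then (st.1 ++ [(st.2.1, st.2.2)], ([] : List Char), st.2.2) else st)
  else
    if st.2.1 ≠ [] ∧ a.2 ≠ st.2.2 then (st.1 ++ [(st.2.1, st.2.2)], [a.1], a.2)
    else (st.1, st.2.1 ++ [a.1], a.2)

-- merging scan step over an annotated character
def pvStepM (st : List (List Char × Bool) × List Char × Bool) (a : Char × Bool) :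
    List (List Char × Bool) × List Char × Bool :=
  if PySem.Chars.isspace a.1 then
    (if st.2.1 ≠ [] then (pvMergeStep st.1 (st.2.1, st.2.2), ([] : List Char), st.2.2) else st)
  else
    if st.2.1 ≠ [] ∧ a.2 ≠ st.2.2 then (pvMergeStep st.1 (st.2.1, st.2.2), [a.1], a.2)
    else (st.1, st.2.1 ++ [a.1], a.2)

-- the plain scan over a constant-flag segment, as explicit recursion
def pvRun : List Char → List (List Char × Bool) → List Char → Bool → Bool →
    List (List Char × Bool) × List Char × Bool
  | [], out, buf, f, _ => (out, buf, f)
  | c :: rest, out, buf, f, b =>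
    if PySem.Chars.isspace c then
      (if buf = [] then pvRun rest out [] f b else pvRun rest (out ++ [(buf, f)]) [] f b)
    else pvRun rest out (buf ++ [c]) b b

-- flush the pending buffer
def pvFin (st : List (List Char × Bool) × List Char × Bool) : List (List Char × Bool) :=
  st.1 ++ (if st.2.1 = [] then [] else [(st.2.1, st.2.2)])

-- annotated character stream
def pvAnn (cs : List Char) (lo hi : Int) : List (Char × Bool) :=
  (PySem.List.enumerate cs 0).map (fun ic => (ic.2, decide (lo ≤ ic.1 ∧ ic.1 < hi)))

-- plain tokens of an annotated stream
def pvTokens (xs : List (Char × Bool)) : List (List Char × Bool) :=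
  pvFin (xs.foldl pvStepP ([], [], false))

lemma pvRun_eq_foldl (cs : List Char) (b : Bool) :
    ∀ (out : List (List Char × Bool)) (buf : List Char) (f : Bool), (buf ≠ [] → f = b) →
      (cs.map (fun c => (c, b))).foldl pvStepP (out, buf, f) = pvRun cs out buf f b := by
  induction cs with
  | nil => intro out buf f _; simp [pvRun]
  | cons c rest ih =>
    intro out buf f h
    simp only [List.map_cons, List.foldl_cons, pvRun]
    by_cases hs : PySem.Chars.isspace c
    · by_cases hb : buf = []
      · subst hb
        rw [show pvStepP (out, ([] : List Char), f) (c, b) = (out, [], f) by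
          simp [pvStepP, hs]]
        simp only [hs, if_true]
        exact ih out [] f (by simp)
      · rw [show pvStepP (out, buf, f) (c, b) = (out ++ [(buf, f)], [], f) by
          simp [pvStepP, hs, hb]]
        simp only [hs, if_neg hb, if_true]
        exact ih (out ++ [(buf, f)]) [] f (by simp)
    · have hcond : ¬ (buf ≠ [] ∧ b ≠ f) := by
        rintro ⟨h1, h2⟩; exact h2 (h h1).symm
      rw [show pvStepP (out, buf, f) (c, b) = (out, buf ++ [c], b) by
        simp only [pvStepP]; rw [if_neg (by simpa using hs), if_neg hcond]]
      simp only [hs]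
      exact ih out (buf ++ [c]) b (by intro _; rfl)

lemma pvRun_flag (cs : List Char) :
    ∀ (out : List (List Char × Bool)) (buf : List Char) (f b : Bool), (buf ≠ [] → f = b) →
      ((pvRun cs out buf f b).2.1 ≠ [] → (pvRun cs out buf f b).2.2 = b) := by
  induction cs with
  | nil => intro out buf f b h; simpa [pvRun] using h
  | cons c rest ih =>
    intro out buf f b h
    simp only [pvRun]
    by_cases hs : PySem.Chars.isspace c
    · by_cases hb : buf = []
      · simp only [hs, if_true, if_pos hb]; exact ih out [] f b (by simp)
      · simp only [hs, if_true, if_neg hb]; exact ih (out ++ [(buf, f)]) [] f b (by simp)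
    · simp only [hs]; exact ih out (buf ++ [c]) b b (by intro _; rfl)

lemma pvGo_acc (cs : List Char) :
    ∀ (cur : List Char) (acc : List (List Char)),
      PySem.Chars.split₀.go cs cur acc = acc.reverse ++ PySem.Chars.split₀.go cs cur [] := by
  induction cs with
  | nil =>
    intro cur acc
    by_cases hc : cur.isEmpty
    · simp [PySem.Chars.split₀.go, hc]
    · simp [PySem.Chars.split₀.go, hc]
  | cons c rest ih =>
    intro cur acc
    by_cases hs : PySem.Chars.isspace c
    · by_cases hc : cur.isEmpty
      · simp only [PySem.Chars.split₀.go, hs, if_true, hc]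
        exact ih [] acc
      · simp only [PySem.Chars.split₀.go, hs, if_true, hc]
        rw [ih [] (cur.reverse :: acc), ih [] [cur.reverse]]
        simp
    · simp only [PySem.Chars.split₀.go, hs]
      exact ih (c :: cur) acc

lemma pvFin_pvRun (cs : List Char) :
    ∀ (out : List (List Char × Bool)) (buf : List Char) (f b : Bool), (buf ≠ [] → f = b) →
      pvFin (pvRun cs out buf f b) = out ++ (PySem.Chars.split₀.go cs buf.reverse []).map (fun w => (w, b)) := by
  induction cs with
  | nil =>
    intro out buf f b h
    by_cases hb : buf = []
    · subst hb; simp [pvRun, pvFin, PySem.Chars.split₀.go]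
    · rw [pvRun, pvFin]
      simp only [PySem.Chars.split₀.go]
      rw [if_neg hb, if_neg (by simpa [List.isEmpty_iff] using hb)]
      simp [h hb]
  | cons c rest ih =>
    intro out buf f b h
    rw [pvRun]
    by_cases hs : PySem.Chars.isspace c
    · rw [if_pos hs]
      by_cases hb : buf = []
      · subst hb
        rw [if_pos rfl, ih out [] f b (by simp)]
        simp [PySem.Chars.split₀.go, hs]
      · rw [if_neg hb, ih (out ++ [(buf, f)]) [] f b (by simp)]
        simp only [PySem.Chars.split₀.go]
        rw [if_pos hs, if_neg (by simpa [List.isEmpty_iff] using hb)]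
        rw [pvGo_acc rest [] [buf.reverse.reverse]]
        simp [h hb]
    · rw [if_neg hs, ih out (buf ++ [c]) b b (by intro _; rfl)]
      have hr : (buf ++ [c]).reverse = c :: buf.reverse := by simp
      rw [hr]
      simp only [PySem.Chars.split₀.go]
      rw [if_neg hs]

lemma pvBoundary (ys : List Char) (b' : Bool) (out : List (List Char × Bool)) (buf : List Char) (f : Bool)
    (h1 : buf ≠ [] → f ≠ b') (h2 : ys ≠ []) :
    (ys.map (fun c => (c, b'))).foldl pvStepP (out, buf, f) = pvRun ys (pvFin (out, buf, f)) [] f b' := by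
  obtain ⟨c, ys', rfl⟩ := List.exists_cons_of_ne_nil h2
  simp only [List.map_cons, List.foldl_cons]
  by_cases hs : PySem.Chars.isspace c
  · have hstep : pvStepP (out, buf, f) (c, b') = (pvFin (out, buf, f), [], f) := by
      by_cases hb : buf = []
      · simp [pvStepP, hs, hb, pvFin]
      · simp [pvStepP, hs, hb, pvFin]
    rw [hstep, pvRun_eq_foldl ys' b' (pvFin (out, buf, f)) [] f (by simp)]
    simp [pvRun, hs]
  · have hstep : pvStepP (out, buf, f) (c, b') = (pvFin (out, buf, f), [c], b') := by
      by_cases hb : buf = []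
      · simp [pvStepP, hs, hb, pvFin]
      · have hfb : ¬ b' = f := fun e => h1 hb e.symm
        simp [pvStepP, hs, hb, pvFin, hfb]
    rw [hstep, pvRun_eq_foldl ys' b' (pvFin (out, buf, f)) [c] b' (by intro _; rfl)]
    simp [pvRun, hs]

lemma pvFuse (xs : List (Char × Bool)) :
    ∀ (outP : List (List Char × Bool)) (buf : List Char) (f : Bool),
      xs.foldl pvStepM (outP.foldl pvMergeStep [], buf, f) =
        ((xs.foldl pvStepP (outP, buf, f)).1.foldl pvMergeStep [],
         (xs.foldl pvStepP (outP, buf, f)).2.1, (xs.foldl pvStepP (outP, buf, f)).2.2) := by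
  induction xs with
  | nil => intro outP buf f; simp
  | cons a xs ih =>
    intro outP buf f
    simp only [List.foldl_cons]
    by_cases hs : PySem.Chars.isspace a.1
    · by_cases hb : buf = []
      · subst hb
        rw [show pvStepM (outP.foldl pvMergeStep [], ([] : List Char), f) a
              = (outP.foldl pvMergeStep [], ([] : List Char), f) by simp [pvStepM, hs]]
        rw [show pvStepP (outP, ([] : List Char), f) a = (outP, ([] : List Char), f) by
          simp [pvStepP, hs]]
        exact ih outP [] f
      · rw [show pvStepM (outP.foldl pvMergeStep [], buf, f) a
              = (pvMergeStep (outP.foldl pvMergeStep []) (buf, f), ([] : List Char), f) by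
          simp [pvStepM, hs, hb]]
        rw [show pvStepP (outP, buf, f) a = (outP ++ [(buf, f)], ([] : List Char), f) by
          simp [pvStepP, hs, hb]]
        rw [show pvMergeStep (outP.foldl pvMergeStep []) (buf, f)
              = (outP ++ [(buf, f)]).foldl pvMergeStep [] by simp [List.foldl_append]]
        exact ih (outP ++ [(buf, f)]) [] f
    · by_cases hc : buf ≠ [] ∧ a.2 ≠ f
      · rw [show pvStepM (outP.foldl pvMergeStep [], buf, f) a
              = (pvMergeStep (outP.foldl pvMergeStep []) (buf, f), [a.1], a.2) by
          simp only [pvStepM]; rw [if_neg (by simpa using hs), if_pos hc]]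
        rw [show pvStepP (outP, buf, f) a = (outP ++ [(buf, f)], [a.1], a.2) by
          simp only [pvStepP]; rw [if_neg (by simpa using hs), if_pos hc]]
        rw [show pvMergeStep (outP.foldl pvMergeStep []) (buf, f)
              = (outP ++ [(buf, f)]).foldl pvMergeStep [] by simp [List.foldl_append]]
        exact ih (outP ++ [(buf, f)]) [a.1] a.2
      · rw [show pvStepM (outP.foldl pvMergeStep [], buf, f) a
              = (outP.foldl pvMergeStep [], buf ++ [a.1], a.2) by
          simp only [pvStepM]; rw [if_neg (by simpa using hs), if_neg hc]]
        rw [show pvStepP (outP, buf, f) a = (outP, buf ++ [a.1], a.2) by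
          simp only [pvStepP]; rw [if_neg (by simpa using hs), if_neg hc]]
        exact ih outP (buf ++ [a.1]) a.2

lemma pvAnnConst (lo hi : Int) (b : Bool) :
    ∀ (cs : List Char) (s : Int), (∀ i : Int, s ≤ i → i < s + cs.length → decide (lo ≤ i ∧ i < hi) = b) →
      (PySem.List.enumerate cs s).map (fun ic => (ic.2, decide (lo ≤ ic.1 ∧ ic.1 < hi))) = cs.map (fun c => (c, b)) := by
  intro cs
  induction cs with
  | nil => intro s _; simp [PySem.List.enumerate_nil]
  | cons c rest ih =>
    intro s h
    rw [PySem.List.enumerate_cons]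
    simp only [List.map_cons]
    congr 1
    · have : decide (lo ≤ s ∧ s < hi) = b := by
        apply h s le_rfl
        simp only [List.length_cons]
        push_cast
        omega
      simpa using this
    · apply ih (s + 1)
      intro i h1 h2
      apply h i (by omega)
      simp only [List.length_cons] at h2 ⊢
      push_cast at h2 ⊢
      omega

lemma pvTokens_const (cs : List Char) (b : Bool) :
    pvTokens (cs.map (fun c => (c, b))) = (PySem.Chars.split₀ cs).map (fun w => (w, b)) := by
  unfold pvTokens
  rw [pvRun_eq_foldl cs b [] [] false (by simp)]
  rw [pvFin_pvRun cs [] [] false b (by simp)]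
  simp [PySem.Chars.split₀]

lemma pvTokens_three (X Y Z : List Char) (hY : Y ≠ []) :
    pvTokens (X.map (fun c => (c, false)) ++ Y.map (fun c => (c, true)) ++ Z.map (fun c => (c, false))) =
      (PySem.Chars.split₀ X).map (fun w => (w, false)) ++ (PySem.Chars.split₀ Y).map (fun w => (w, true))
        ++ (PySem.Chars.split₀ Z).map (fun w => (w, false)) := by
  unfold pvTokens
  rw [List.foldl_append, List.foldl_append]
  rw [pvRun_eq_foldl X false [] [] false (by simp)]
  rcases hR1 : pvRun X [] [] false false with ⟨o1, b1, f1⟩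
  have hflag1 : b1 ≠ [] → f1 = false := by
    have := pvRun_flag X [] [] false false (by simp)
    rw [hR1] at this; exact this
  have hfin1 : pvFin (o1, b1, f1) = (PySem.Chars.split₀ X).map (fun w => (w, false)) := by
    have := pvFin_pvRun X [] [] false false (by simp)
    rw [hR1] at this
    simpa [PySem.Chars.split₀] using this
  rw [pvBoundary Y true o1 b1 f1 (fun hb => by simp [hflag1 hb]) hY, hfin1]
  rcases hR2 : pvRun Y ((PySem.Chars.split₀ X).map (fun w => (w, false))) [] f1 true with ⟨o2, b2, f2⟩
  have hflag2 : b2 ≠ [] → f2 = true := by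
    have := pvRun_flag Y ((PySem.Chars.split₀ X).map (fun w => (w, false))) [] f1 true (by simp)
    rw [hR2] at this; exact this
  have hfin2 : pvFin (o2, b2, f2) = (PySem.Chars.split₀ X).map (fun w => (w, false))
      ++ (PySem.Chars.split₀ Y).map (fun w => (w, true)) := by
    have := pvFin_pvRun Y ((PySem.Chars.split₀ X).map (fun w => (w, false))) [] f1 true (by simp)
    rw [hR2] at this
    simpa [PySem.Chars.split₀] using this
  by_cases hZ : Z = []
  · subst hZ
    simp only [List.map_nil, List.foldl_nil]
    rw [hfin2]
    simp [PySem.Chars.split₀, PySem.Chars.split₀.go]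
  · rw [pvBoundary Z false o2 b2 f2 (fun hb => by simp [hflag2 hb]) hZ, hfin2]
    rw [pvFin_pvRun Z _ [] f2 false (by simp)]
    simp [PySem.Chars.split₀, List.append_assoc]

-- B's whole computation, re-expressed through the plain tokens of the annotated stream
lemma pvAlt_eq (cs : List Char) (lo hi : Int) :
    (if ((PySem.List.enumerate cs 0).foldl (pvStepB lo hi) ([], [], false)).2.1 ≠ [] then
       pvMergeStep ((PySem.List.enumerate cs 0).foldl (pvStepB lo hi) ([], [], false)).1
         (((PySem.List.enumerate cs 0).foldl (pvStepB lo hi) ([], [], false)).2.1,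
          ((PySem.List.enumerate cs 0).foldl (pvStepB lo hi) ([], [], false)).2.2)
     else ((PySem.List.enumerate cs 0).foldl (pvStepB lo hi) ([], [], false)).1) =
      (pvTokens (pvAnn cs lo hi)).foldl pvMergeStep [] := by
  have hfold : (PySem.List.enumerate cs 0).foldl (pvStepB lo hi) (([] : List (List Char × Bool)), ([] : List Char), false)
      = (pvAnn cs lo hi).foldl pvStepM ([], [], false) := by
    unfold pvAnn
    rw [List.foldl_map]
    rfl
  rw [hfold]
  have hP := pvFuse (pvAnn cs lo hi) [] [] false
  simp only [List.foldl_nil] at hP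
  rw [hP]
  rcases hQ : (pvAnn cs lo hi).foldl pvStepP ([], [], false) with ⟨o, b, f⟩
  simp only
  unfold pvTokens
  rw [hQ]
  by_cases hb : b = []
  · simp [pvFin, hb]
  · simp [pvFin, hb, List.foldl_append]

lemma pvAnn_const_false (cs : List Char) (lo hi : Int) (h : ∀ i : Int, ¬ (lo ≤ i ∧ i < hi)) :
    pvAnn cs lo hi = cs.map (fun c => (c, false)) := by
  apply pvAnnConst lo hi false cs 0
  intro i _ _
  simpa using h i

lemma pvAnn_three (cs : List Char) (n L : Nat) (hle : n + L ≤ cs.length) :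
    pvAnn cs (n : Int) ((n : Int) + (L : Int)) =
      (cs.take n).map (fun c => (c, false)) ++ (((cs.drop n).take L).map (fun c => (c, true))
        ++ (cs.drop (n + L)).map (fun c => (c, false))) := by
  have hdd : cs.drop (n + L) = (cs.drop n).drop L := by
    rw [List.drop_drop]
  have hcs : cs.take n ++ ((cs.drop n).take L ++ cs.drop (n + L)) = cs := by
    rw [hdd, List.take_append_drop, List.take_append_drop]
  have l1 : (cs.take n).length = n := by rw [List.length_take]; omega
  have l2 : ((cs.drop n).take L).length = L := by
    simp only [List.length_take, List.length_drop]; omega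
  have e1 : (PySem.List.enumerate (cs.take n) 0).map
      (fun ic => (ic.2, decide ((n : Int) ≤ ic.1 ∧ ic.1 < (n : Int) + (L : Int))))
      = (cs.take n).map (fun c => (c, false)) := by
    apply pvAnnConst
    intro i h1 h2
    rw [l1] at h2
    simp only [decide_eq_false_iff_not]
    omega
  have e2 : (PySem.List.enumerate ((cs.drop n).take L) (0 + (cs.take n).length)).map
      (fun ic => (ic.2, decide ((n : Int) ≤ ic.1 ∧ ic.1 < (n : Int) + (L : Int))))
      = ((cs.drop n).take L).map (fun c => (c, true)) := by
    apply pvAnnConst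
    intro i h1 h2
    rw [l1] at h1
    rw [l1, l2] at h2
    simp only [decide_eq_true_eq]
    omega
  have e3 : (PySem.List.enumerate (cs.drop (n + L)) ((0 + (cs.take n).length) + ((cs.drop n).take L).length)).map
      (fun ic => (ic.2, decide ((n : Int) ≤ ic.1 ∧ ic.1 < (n : Int) + (L : Int))))
      = (cs.drop (n + L)).map (fun c => (c, false)) := by
    apply pvAnnConst
    intro i h1 _
    rw [l1, l2] at h1
    simp only [decide_eq_false_iff_not]
    omega
  conv_lhs => rw [← hcs]
  unfold pvAnn
  rw [PySem.List.enumerate_append, PySem.List.enumerate_append]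
  rw [List.map_append, List.map_append, e1, e2, e3]

-- ===== VERDICT (by name: the statement is the Claim_ definition above) =====
theorem tokenize_with_highlight_py_spec : Claim_equal_tokenize_with_highlight_py := by
  intro text highlight _
  unfold Spec_tokenize_with_highlight_py
  cases highlight with
  | none =>
    simp only [tokenize_with_highlight_py, tokenize_with_highlight_py_alt]
    rw [pvAlt_eq, pvAnn_const_false _ _ _ (by intro i; omega), pvTokens_const]
  | some h =>
    by_cases hh : h.toList = []
    · simp only [tokenize_with_highlight_py, tokenize_with_highlight_py_alt, if_pos hh]
      rw [pvAlt_eq, pvAnn_const_false _ _ _ (by intro i; omega), pvTokens_const]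
    · simp only [tokenize_with_highlight_py, tokenize_with_highlight_py_alt, if_neg hh]
      set lo := PySem.Chars.find (PySem.Chars.lower text.toList) (PySem.Chars.lower h.toList) with hlodef
      by_cases hneg : lo < 0
      · rw [if_pos hneg, if_neg (by omega : ¬ (0:Int) ≤ lo)]
        rw [pvAlt_eq, pvAnn_const_false _ _ _ (by intro i; omega), pvTokens_const]
      · have hpos : 0 ≤ lo := by omega
        obtain ⟨n, hn⟩ : ∃ n : Nat, lo = (n : Int) := ⟨lo.toNat, (Int.toNat_of_nonneg hpos).symm⟩
        have hsub := (PySem.Chars.find_spec (s := PySem.Chars.lower text.toList)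
          (sub := PySem.Chars.lower h.toList) hpos).1
        rw [← hlodef, hn] at hsub
        simp only [Int.toNat_natCast] at hsub
        have hlen1 := hsub.length_le
        simp only [PySem.Chars.lower, List.length_map, List.length_drop] at hlen1
        have hLpos : 0 < h.toList.length := List.length_pos_iff.mpr hh
        have hle : n + h.toList.length ≤ text.toList.length := by omega
        rw [if_neg hneg, if_pos hpos, pvAlt_eq, hn]
        rw [PySem.List.slice_to_natCast, PySem.List.slice_natCast_add]
        rw [pvAnn_three text.toList n h.toList.length hle]
        rw [show ((n : Int) + (h.toList.length : Int)) = ((n + h.toList.length : Nat) : Int) by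
          push_cast; ring]
        rw [PySem.List.slice_from_natCast]
        rw [← List.append_assoc]
        rw [pvTokens_three _ _ _ (by
          intro he
          have hl0 : ((text.toList.drop n).take h.toList.length).length = 0 := by rw [he]; rfl
          simp only [List.length_take, List.length_drop] at hl0
          omega)]
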